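-- pv_equiv track=rewrite | github.com/garciparedes/tuenti-challenge-9 | src/hash_of_cards.py | possible_decomposes
-- ===== SOURCE A (Python) =====
-- from copy import deepcopy
-- from typing import List, Tuple, Iterable, Set
--
-- def possible_decomposes(value: int) -> List[List[int]]:
--     if value < 48:
--         raise Exception
--
--     result = list()
--     if 48 <= value <= 122:
--         result += [[value]]
--
--     if 96 <= value <= 170:
--         result += [[48, value - 48]]
--     if 170 < value <= 244:
--         result += [[122, value - 122]]
--     if 144 <= value <= 218:
--         result += [[48, 48, value - 48 * 2]]
--     if 218 < value:
--         d1 = possible_decomposes(value - 122)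
--         d2 = deepcopy(d1)
--         for i in range(len(d1)):
--             d1[i].append(122)
--             d2[i].extend([48, 74])
--         result += d1 + d2
--
--     assert all(sum(r) == value for r in result)
--     return result
-- ===== SOURCE B (Python) =====
-- def possible_decomposes(value):
--     if value < 48:
--         raise Exception
--     # descending chain: last element is the first value <= 218
--     chain = [value]
--     while chain[-1] > 218:
--         chain.append(chain[-1] - 122)
--
--     def base(v):
--         res = []
--         if 48 <= v <= 122:
--             res.append([v])
--         if 96 <= v <= 170:
--             res.append([48, v - 48])
--         if 170 < v <= 244:
--             res.append([122, v - 122])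
--         if 144 <= v <= 218:
--             res.append([48, 48, v - 96])
--         return res
--
--     prev = base(chain[-1])
--     for v in reversed(chain[:-1]):
--         prev = base(v) + [r + [122] for r in prev] + [r + [48, 74] for r in prev]
--     return prev
-- ===== Notes on version B (the rewrite author's own statement) =====
-- stated objective: alternative
-- what changed: Replaced the top-down recursion with deepcopy by an explicit bottom-up loop over the precomputed descending chain value, value-122, ..., building each level's list afresh (base terms, then +[122], then +[48,74]) with no copying.
import Mathlib
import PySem

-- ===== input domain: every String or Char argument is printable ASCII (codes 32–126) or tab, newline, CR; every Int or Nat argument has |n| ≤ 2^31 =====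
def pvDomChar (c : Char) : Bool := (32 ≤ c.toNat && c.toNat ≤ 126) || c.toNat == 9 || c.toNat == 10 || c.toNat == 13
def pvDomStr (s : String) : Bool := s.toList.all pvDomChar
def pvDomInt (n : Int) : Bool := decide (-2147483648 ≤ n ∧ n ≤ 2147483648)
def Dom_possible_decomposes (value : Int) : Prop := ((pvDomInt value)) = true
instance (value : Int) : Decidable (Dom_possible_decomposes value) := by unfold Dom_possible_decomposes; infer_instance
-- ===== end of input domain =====

-- B replaces A's top-down recursion with deepcopy by a bottom-up loop over the descending
-- chain value, value-122, …, building each level afresh, without recursion or copying.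
-- A raises on value < 48; those inputs are outside Pre_.

-- ===== PORT A =====
def possible_decomposes (value : Int) : List (List Int) :=
  let r1 : List (List Int) := if 48 ≤ value ∧ value ≤ 122 then [[value]] else []
  let r2 : List (List Int) := if 96 ≤ value ∧ value ≤ 170 then [[48, value - 48]] else []
  let r3 : List (List Int) := if 170 < value ∧ value ≤ 244 then [[122, value - 122]] else []
  let r4 : List (List Int) := if 144 ≤ value ∧ value ≤ 218 then [[48, 48, value - 48 * 2]] else []
  if _h : 218 < value then
    let d1 := possible_decomposes (value - 122)
    -- the in-place append / extend loops over d1 and its deepcopy d2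
    r1 ++ r2 ++ r3 ++ r4 ++ (d1.map (fun r => r ++ [122]) ++ d1.map (fun r => r ++ [48, 74]))
  else
    r1 ++ r2 ++ r3 ++ r4
termination_by value.toNat
decreasing_by omega

-- ===== PORT B =====
-- the descending chain [value, value-122, …]; last element is the first value ≤ 218
def pdChain (v : Int) : List Int :=
  if h : 218 < v then v :: pdChain (v - 122) else [v]
termination_by v.toNat
decreasing_by omega

def pdBase (v : Int) : List (List Int) :=
  (if 48 ≤ v ∧ v ≤ 122 then [[v]] else []) ++
  (if 96 ≤ v ∧ v ≤ 170 then [[48, v - 48]] else []) ++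
  (if 170 < v ∧ v ≤ 244 then [[122, v - 122]] else []) ++
  (if 144 ≤ v ∧ v ≤ 218 then [[48, 48, v - 96]] else [])

def possible_decomposes_alt (value : Int) : List (List Int) :=
  match (pdChain value).reverse with
  | [] => []  -- unreachable: the chain is never empty
  | b :: rest =>
      rest.foldl
        (fun prev v =>
          pdBase v ++ prev.map (fun r => r ++ [122]) ++ prev.map (fun r => r ++ [48, 74]))
        (pdBase b)

-- ===== PRECONDITION & SPEC =====
-- A raises Exception on value < 48; exactly those inputs are excluded.
def Pre_possible_decomposes (value : Int) : Prop := 48 ≤ value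
instance (value : Int) : Decidable (Pre_possible_decomposes value) := by
  unfold Pre_possible_decomposes; infer_instance
def pvWitness_possible_decomposes : Int := (100)

def Spec_possible_decomposes (value : Int) (out : List (List Int)) : Prop := out = possible_decomposes_alt value
instance (value : Int) (out : List (List Int)) : Decidable (Spec_possible_decomposes value out) := by unfold Spec_possible_decomposes; infer_instance

-- ===== CLAIM (what is proved, stated in full; the proofs are below) =====
def Claim_equal_possible_decomposes : Prop := ∀ (value : Int), Dom_possible_decomposes value → Pre_possible_decomposes value → Spec_possible_decomposes value (possible_decomposes value)

-- ===== LEMMAS AND PROOFS =====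

theorem pdChain_ne_nil (v : Int) : pdChain v ≠ [] := by
  unfold pdChain
  split <;> simp

-- B's bottom-up pass computes A's recursion, for every value (no lower bound needed)
theorem alt_eq (v : Int) : possible_decomposes_alt v = possible_decomposes v := by
  generalize hn : v.toNat = n
  induction n using Nat.strong_induction_on generalizing v with
  | _ n ih =>
    by_cases h : 218 < v
    · have hch : pdChain v = v :: pdChain (v - 122) := by
        rw [pdChain]; simp [h]
      obtain ⟨b, rest, hr⟩ : ∃ b rest, (pdChain (v - 122)).reverse = b :: rest := by
        cases hrev : (pdChain (v - 122)).reverse with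
        | nil => exact absurd (by simpa using hrev) (pdChain_ne_nil _)
        | cons b rest => exact ⟨b, rest, rfl⟩
      have ihv : possible_decomposes_alt (v - 122) = possible_decomposes (v - 122) :=
        ih (v - 122).toNat (by omega) (v - 122) rfl
      have halt : possible_decomposes_alt (v - 122) = rest.foldl
          (fun prev w => pdBase w ++ prev.map (fun r => r ++ [122]) ++ prev.map (fun r => r ++ [48, 74]))
          (pdBase b) := by
        unfold possible_decomposes_alt
        rw [hr]
      unfold possible_decomposes_alt
      rw [hch]
      simp only [List.reverse_cons, hr, List.cons_append, List.foldl_append,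
        List.foldl_cons, List.foldl_nil]
      rw [← halt, ihv]
      conv_rhs => rw [possible_decomposes]
      simp only [dif_pos h]
      have h1 : ¬ (48 ≤ v ∧ v ≤ 122) := by omega
      have h2 : ¬ (96 ≤ v ∧ v ≤ 170) := by omega
      have h4 : ¬ (144 ≤ v ∧ v ≤ 218) := by omega
      have hb : pdBase v = (if 170 < v ∧ v ≤ 244 then [[122, v - 122]] else []) := by
        unfold pdBase
        simp [h1, h2, h4]
      rw [hb]
      simp only [if_neg h1, if_neg h2, if_neg h4, List.nil_append, List.append_nil,
        List.append_assoc]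
    · -- base case: the chain is [v]
      have hch : pdChain v = [v] := by rw [pdChain]; simp [h]
      unfold possible_decomposes_alt
      rw [hch]
      simp only [List.reverse_cons, List.reverse_nil, List.nil_append, List.foldl_nil]
      conv_rhs => rw [possible_decomposes]
      simp only [dif_neg h]
      unfold pdBase
      have h96 : v - 48 * 2 = v - 96 := by ring
      rw [h96]

-- ===== VERDICT (by name: the statement is the Claim_ definition above) =====
theorem possible_decomposes_spec : Claim_equal_possible_decomposes := by
  intro value _ _
  unfold Spec_possible_decomposes
  exact (alt_eq value).symm
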